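-- pv_equiv track=rewrite | github.com/arpituppal2/local-computer | scripts/subagents.py | pick_subagent
-- ===== SOURCE A (Python) =====
-- def pick_subagent(goal: str, state: dict, history: list) -> str:
--     """Returns a routing label: 'chatbot' | 'search' | 'workflow' | 'browse'."""
--     g = (goal or "").lower()
--     url = (state.get("url") or "").lower()
--
--     # Force chatbot for complex reasoning tasks
--     if any(x in g for x in [
--         "ask gemini", "use claude", "ask chatgpt", "ask copilot", "via chatgpt",
--         "ask perplexity", "deep analysis", "synthesize", "explain in depth",
--     ]):
--         return "chatbot"
--
--     if any(x in g for x in ["calendar", "docs", "drive", "gmail", "youtube",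
--                             "prose", "notion", "sheet", "slides"]):
--         return "workflow"
--     if any(x in url for x in ["calendar.google.com", "docs.google.com",
--                               "drive.google.com", "mail.google.com", "youtube.com"]):
--         return "workflow"
--     if any(x in g for x in ["search", "look up", "find", "latest", "news",
--                             "price", "who is", "what is"]):
--         return "search"
--     if any(x in url for x in ["bing.com", "google.com/search", "duckduckgo.com"]):
--         return "search"
--     return "browse"
-- ===== SOURCE B (Python) =====
-- # B: one flat keyword table scanned in a single pass keeping the minimum
-- # matching rule priority; labels looked up at the end. No staged if-chain,
-- # no per-rule early return.
--
-- _TIERS = [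
--     (False, 0, ["ask gemini", "use claude", "ask chatgpt", "ask copilot", "via chatgpt",
--                 "ask perplexity", "deep analysis", "synthesize", "explain in depth"]),
--     (False, 1, ["calendar", "docs", "drive", "gmail", "youtube",
--                 "prose", "notion", "sheet", "slides"]),
--     (True,  2, ["calendar.google.com", "docs.google.com", "drive.google.com",
--                 "mail.google.com", "youtube.com"]),
--     (False, 3, ["search", "look up", "find", "latest", "news",
--                 "price", "who is", "what is"]),
--     (True,  4, ["bing.com", "google.com/search", "duckduckgo.com"]),
-- ]
-- _FLAT = [(pri, use_url, kw) for use_url, pri, kws in _TIERS for kw in kws]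
-- _LABELS = ["chatbot", "workflow", "workflow", "search", "search", "browse"]
--
--
-- def pick_subagent(goal: str, state: dict, history: list) -> str:
--     """Returns a routing label: 'chatbot' | 'search' | 'workflow' | 'browse'."""
--     g = (goal or "").lower()
--     url = (state.get("url") or "").lower()
--     best = 5
--     for pri, use_url, kw in _FLAT:
--         if pri < best and kw in (url if use_url else g):
--             best = pri
--     return _LABELS[best]
-- ===== Notes on version B (the rewrite author's own statement) =====
-- stated objective: alternative
-- what changed: Replaces the staged if/return chain by one flat (priority, source, keyword) table scanned in a single pass with a min-priority accumulator; the label is looked up from the final minimum, so there is no per-rule any() and no early return.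
import Mathlib
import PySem

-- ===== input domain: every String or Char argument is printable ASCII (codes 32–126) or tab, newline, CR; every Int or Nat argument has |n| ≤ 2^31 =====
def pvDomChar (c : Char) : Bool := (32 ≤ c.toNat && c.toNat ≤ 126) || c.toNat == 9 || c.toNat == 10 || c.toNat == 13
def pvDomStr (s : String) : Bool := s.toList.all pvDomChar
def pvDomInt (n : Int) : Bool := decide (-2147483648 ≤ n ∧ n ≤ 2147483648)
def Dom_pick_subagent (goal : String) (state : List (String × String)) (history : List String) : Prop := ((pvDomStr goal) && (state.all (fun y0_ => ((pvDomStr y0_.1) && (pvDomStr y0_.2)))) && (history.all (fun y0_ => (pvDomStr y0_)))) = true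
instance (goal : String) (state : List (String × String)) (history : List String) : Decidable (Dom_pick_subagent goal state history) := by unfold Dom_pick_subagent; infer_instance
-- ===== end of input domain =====

-- B replaces the staged if/return chain by a single pass over one flat keyword table with a min-priority accumulator; objective: alternative (same cost).


-- ===== PORT A =====
def pick_subagent (goal : String) (state : List (String × String)) (history : List String) : String :=
  let g := PySem.Str.lower (if goal == "" then "" else goal)
  let url := PySem.Str.lower (((PySem.Dict.mk state).get? "url").getD "")
  if (["ask gemini", "use claude", "ask chatgpt", "ask copilot", "via chatgpt",
       "ask perplexity", "deep analysis", "synthesize", "explain in depth"].any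
        (fun x => PySem.Str.isIn x g)) then "chatbot"
  else if (["calendar", "docs", "drive", "gmail", "youtube",
            "prose", "notion", "sheet", "slides"].any (fun x => PySem.Str.isIn x g)) then "workflow"
  else if (["calendar.google.com", "docs.google.com",
            "drive.google.com", "mail.google.com", "youtube.com"].any
             (fun x => PySem.Str.isIn x url)) then "workflow"
  else if (["search", "look up", "find", "latest", "news",
            "price", "who is", "what is"].any (fun x => PySem.Str.isIn x g)) then "search"
  else if (["bing.com", "google.com/search", "duckduckgo.com"].any
             (fun x => PySem.Str.isIn x url)) then "search"
  else "browse"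


-- ===== PORT B =====
-- B: one flat (priority, use_url, keyword) table, a single pass keeping the
-- minimum matching priority, a label lookup at the end (index is always 0..5).
def pvTiers : List (Bool × Nat × List String) :=
  [ (false, 0, ["ask gemini", "use claude", "ask chatgpt", "ask copilot", "via chatgpt",
                "ask perplexity", "deep analysis", "synthesize", "explain in depth"]),
    (false, 1, ["calendar", "docs", "drive", "gmail", "youtube",
                "prose", "notion", "sheet", "slides"]),
    (true,  2, ["calendar.google.com", "docs.google.com", "drive.google.com",
                "mail.google.com", "youtube.com"]),
    (false, 3, ["search", "look up", "find", "latest", "news",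
                "price", "who is", "what is"]),
    (true,  4, ["bing.com", "google.com/search", "duckduckgo.com"]) ]

def pvFlat : List (Nat × Bool × String) :=
  pvTiers.flatMap (fun t => t.2.2.map (fun kw => (t.2.1, t.1, kw)))

def pvLabels : List String := ["chatbot", "workflow", "workflow", "search", "search", "browse"]

def pick_subagent_alt (goal : String) (state : List (String × String)) (history : List String) : String :=
  let g := PySem.Str.lower (if goal == "" then "" else goal)
  let url := PySem.Str.lower (((PySem.Dict.mk state).get? "url").getD "")
  let best : Nat := pvFlat.foldl
    (fun b r => if r.1 < b ∧ PySem.Str.isIn r.2.2 (if r.2.1 then url else g) then r.1 else b) 5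
  -- _LABELS[best]: best is always in 0..5, so the IndexError default is unreachable
  (PySem.List.pyGet? pvLabels (best : Int)).getD ""


-- ===== PRECONDITION & SPEC =====
def Spec_pick_subagent (goal : String) (state : List (String × String)) (history : List String) (out : String) : Prop := out = pick_subagent_alt goal state history
instance (goal : String) (state : List (String × String)) (history : List String) (out : String) : Decidable (Spec_pick_subagent goal state history out) := by unfold Spec_pick_subagent; infer_instance

-- ===== CLAIM (what is proved, stated in full; the proofs are below) =====
def Claim_equal_pick_subagent : Prop := ∀ (goal : String) (state : List (String × String)) (history : List String), Dom_pick_subagent goal state history → Spec_pick_subagent goal state history (pick_subagent goal state history)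

-- ===== LEMMAS AND PROOFS =====

-- Folding one constant-priority segment of keywords: the accumulator drops to p
-- exactly when p is below it and some keyword matches the segment's source.
theorem foldl_seg (src : String) (p : Nat) (kws : List String) (b : Nat) :
    kws.foldl (fun b kw => if p < b ∧ PySem.Str.isIn kw src then p else b) b
    = if p < b ∧ kws.any (fun kw => PySem.Str.isIn kw src) then p else b := by
  induction kws generalizing b with
  | nil => simp
  | cons kw ks ih =>
    simp only [List.foldl_cons, List.any_cons, Bool.or_eq_true, ih]
    by_cases hk : PySem.Str.isIn kw src = true <;> by_cases hp : p < b <;>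
      by_cases hA : (ks.any (fun kw => PySem.Str.isIn kw src)) = true <;>
      simp_all <;> split_ifs <;> omega

-- The same, in the shape the flat-table fold takes on one tier's mapped segment.
theorem foldl_seg' (g url : String) (p : Nat) (u : Bool) (kws : List String) (b : Nat) :
    (kws.map (fun kw => (p, u, kw))).foldl
      (fun b r => if r.1 < b ∧ PySem.Str.isIn r.2.2 (if r.2.1 then url else g) then r.1 else b) b
    = if p < b ∧ kws.any (fun kw => PySem.Str.isIn kw (if u then url else g)) then p else b := by
  rw [List.foldl_map]
  exact foldl_seg (if u then url else g) p kws b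

-- ===== VERDICT (by name: the statement is the Claim_ definition above) =====
set_option maxHeartbeats 1600000 in
theorem pick_subagent_spec : Claim_equal_pick_subagent := by
  intro goal state history _
  unfold Spec_pick_subagent pick_subagent pick_subagent_alt
  simp only [pvFlat, pvTiers, pvLabels, List.flatMap_cons, List.flatMap_nil,
    List.foldl_append, List.append_nil, foldl_seg', Bool.false_eq_true, if_false, if_true]
  set g := PySem.Str.lower (if goal == "" then "" else goal) with hg
  set url := PySem.Str.lower (((PySem.Dict.mk state).get? "url").getD "") with hu
  generalize (["ask gemini", "use claude", "ask chatgpt", "ask copilot", "via chatgpt",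
       "ask perplexity", "deep analysis", "synthesize", "explain in depth"].any
        (fun x => PySem.Str.isIn x g)) = c0
  generalize (["calendar", "docs", "drive", "gmail", "youtube",
            "prose", "notion", "sheet", "slides"].any (fun x => PySem.Str.isIn x g)) = c1
  generalize (["calendar.google.com", "docs.google.com",
            "drive.google.com", "mail.google.com", "youtube.com"].any
             (fun x => PySem.Str.isIn x url)) = c2
  generalize (["search", "look up", "find", "latest", "news",
            "price", "who is", "what is"].any (fun x => PySem.Str.isIn x g)) = c3
  generalize (["bing.com", "google.com/search", "duckduckgo.com"].any
             (fun x => PySem.Str.isIn x url)) = c4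
  cases c0 <;> cases c1 <;> cases c2 <;> cases c3 <;> cases c4 <;>
    simp [PySem.List.pyGet?, PySem.List.pyIdx?]
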